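-- pv_equiv track=rewrite | github.com/k-harada/AtCoder | ABC/ABC251-300/ABC275/D.py | solve
-- ===== SOURCE A (Python) =====
-- def solve(n):
--     v_dict = dict()
--     v_dict[n] = 0
--     queue = [n]
--     while len(queue) > 0:
--         p = queue.pop()
--         q = p // 2
--         r = p // 3
--         if q > 0:
--             if q not in v_dict.keys():
--                 v_dict[q] = 0
--                 queue.append(q)
--         if r > 0:
--             if r not in v_dict.keys():
--                 v_dict[r] = 0
--                 queue.append(r)
--     v_dict[0] = 1
--     for p in list(sorted(list(v_dict.keys()))):
--         if p == 0:
--             continue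
--         q = p // 2
--         r = p // 3
--         v_dict[p] = v_dict[q] + v_dict[r]
--
--     return v_dict[n]
-- ===== SOURCE B (Python) =====
-- def solve(n):
--     memo = {}
--
--     def f(x):
--         if x == 0:
--             return 1
--         if x in memo:
--             return memo[x]
--         v = f(x // 2) + f(x // 3)
--         memo[x] = v
--         return v
--
--     return f(n)
-- ===== Notes on version B (the rewrite author's own statement) =====
-- stated objective: simpler
-- what changed: Replaces A's two-phase BFS state collection plus sorted bottom-up table fill by a single top-down memoized recursion f(x)=1 if x==0 else f(x//2)+f(x//3), eliminating the queue, the sort and the separate fill pass.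
-- outside the precondition, e.g. on solve(-1): A returns 0, B raises RecursionError
import Mathlib
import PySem

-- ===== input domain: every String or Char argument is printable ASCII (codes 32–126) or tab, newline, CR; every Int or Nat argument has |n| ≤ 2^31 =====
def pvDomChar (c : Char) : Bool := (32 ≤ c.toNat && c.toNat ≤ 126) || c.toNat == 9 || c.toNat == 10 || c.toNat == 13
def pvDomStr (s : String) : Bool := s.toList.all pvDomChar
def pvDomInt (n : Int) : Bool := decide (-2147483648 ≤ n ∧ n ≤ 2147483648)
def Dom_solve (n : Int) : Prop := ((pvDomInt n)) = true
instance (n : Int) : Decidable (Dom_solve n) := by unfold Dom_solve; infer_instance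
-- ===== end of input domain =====

-- B replaces A's BFS-collect-then-sorted-bottom-up DP by a single top-down memoized
-- recursion (objective: simpler — no queue, no sort, no separate fill pass).

-- ===== PORT A =====
-- while queue: p = queue.pop()  (pops the LAST element); the fuel argument only makes the
-- loop total in Lean — the proof shows it is never exhausted while the queue is nonempty.
def solveBFS : Nat → PySem.Dict Int Int → List Int → PySem.Dict Int Int
  | 0, d, _ => d
  | fuel+1, d, queue =>
    match queue.getLast? with
    | none => d
    | some p =>
      let rest := queue.dropLast
      let q := PySem.Int.floordiv p 2
      let r := PySem.Int.floordiv p 3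
      let dq := if 0 < q ∧ d.contains q = false then d.insert q 0 else d
      let queueq := if 0 < q ∧ d.contains q = false then rest ++ [q] else rest
      let dr := if 0 < r ∧ dq.contains r = false then dq.insert r 0 else dq
      let queuer := if 0 < r ∧ dq.contains r = false then queueq ++ [r] else queueq
      solveBFS fuel dr queuer

-- for p in sorted(v_dict.keys()): if p == 0: continue; v_dict[p] = v_dict[p//2] + v_dict[p//3]
-- (both reads are of keys that are always present; getD 0 is exact there)
def solveFill (ks : List Int) (d : PySem.Dict Int Int) : PySem.Dict Int Int :=
  ks.foldl (fun d p =>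
    if p = 0 then d
    else d.insert p (d.getD (PySem.Int.floordiv p 2) 0 + d.getD (PySem.Int.floordiv p 3) 0)) d

def solve (n : Int) : Int :=
  let d0 := (PySem.Dict.empty : PySem.Dict Int Int).insert n 0
  let d1 := solveBFS (2 * n.toNat + 3) d0 [n]
  let d2 := d1.insert 0 1
  let ks := PySem.List.sorted d2.keys (fun x => x) false
  let d3 := solveFill ks d2
  d3.getD n 0

-- ===== PORT B =====
-- top-down memoized recursion; fuel only makes it total (n.toNat + 1 strictly bounds the
-- recursion depth since x strictly decreases on each call for x > 0)
def fMemo : Nat → Int → PySem.Dict Int Int → Int × PySem.Dict Int Int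
  | 0, _, memo => (0, memo)
  | fuel+1, x, memo =>
    if x = 0 then (1, memo)
    else
      match memo.get? x with
      | some v => (v, memo)
      | none =>
        let a := fMemo fuel (PySem.Int.floordiv x 2) memo
        let b := fMemo fuel (PySem.Int.floordiv x 3) a.2
        let v := a.1 + b.1
        (v, b.2.insert x v)

def solve_alt (n : Int) : Int := (fMemo (n.toNat + 1) n PySem.Dict.empty).1

-- ===== PRECONDITION & SPEC =====
-- Pre_ excludes negative n: there A's q>0/r>0 guards stop the BFS and it returns 0, while
-- the natural memoized recursion never reaches the base case 0 and raises RecursionError.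
def Pre_solve (n : Int) : Prop := 0 ≤ n
instance (n : Int) : Decidable (Pre_solve n) := by unfold Pre_solve; infer_instance
def pvWitness_solve : Int := (6)
def Spec_solve (n : Int) (out : Int) : Prop := out = solve_alt n
instance (n : Int) (out : Int) : Decidable (Spec_solve n out) := by unfold Spec_solve; infer_instance

-- ===== CLAIM (what is proved, stated in full; the proofs are below) =====
def Claim_equal_solve : Prop := ∀ (n : Int), Dom_solve n → Pre_solve n → Spec_solve n (solve n)

-- ===== LEMMAS AND PROOFS =====

-- the mathematical function both programs compute
def F : Nat → Int
  | 0 => 1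
  | k+1 => F ((k+1)/2) + F ((k+1)/3)
decreasing_by all_goals exact Nat.div_lt_self (Nat.succ_pos _) (by norm_num)

lemma F_pos (k : Nat) (h : 0 < k) : F k = F (k/2) + F (k/3) := by
  cases k with
  | zero => omega
  | succ m => rw [F]

-- ---------- B side ----------
def MemoOK (m : PySem.Dict Int Int) : Prop :=
  ∀ x v, m.get? x = some v → 0 ≤ x ∧ v = F x.toNat

lemma fMemo_correct : ∀ (fuel : Nat) (x : Int) (m : PySem.Dict Int Int),
    0 ≤ x → x.toNat < fuel → MemoOK m →
    (fMemo fuel x m).1 = F x.toNat ∧ MemoOK (fMemo fuel x m).2 := by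
  intro fuel
  induction fuel with
  | zero => intro x m hx hf hm; omega
  | succ f ih =>
    intro x m hx hf hm
    by_cases hx0 : x = 0
    · subst hx0
      have he : fMemo (f+1) 0 m = (1, m) := by simp [fMemo]
      rw [he]
      exact ⟨by rw [Int.toNat_zero, F], hm⟩
    · have hxpos : 0 < x := lt_of_le_of_ne hx (Ne.symm hx0)
      have h2 : PySem.Int.floordiv x 2 = x / 2 :=
        PySem.Int.floordiv_eq_ediv_of_pos (by norm_num)
      have h3 : PySem.Int.floordiv x 3 = x / 3 :=
        PySem.Int.floordiv_eq_ediv_of_pos (by norm_num)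
      simp only [fMemo, if_neg hx0]
      cases hg : m.get? x with
      | some v =>
        simp only []
        exact ⟨(hm x v hg).2, hm⟩
      | none =>
        simp only []
        obtain ⟨ha1, ha2⟩ := ih (PySem.Int.floordiv x 2) m
          (by rw [h2]; omega) (by rw [h2]; omega) hm
        obtain ⟨hb1, hb2⟩ := ih (PySem.Int.floordiv x 3)
          (fMemo f (PySem.Int.floordiv x 2) m).2 (by rw [h3]; omega) (by rw [h3]; omega) ha2
        have hval : (fMemo f (PySem.Int.floordiv x 2) m).1 +
            (fMemo f (PySem.Int.floordiv x 3) (fMemo f (PySem.Int.floordiv x 2) m).2).1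
            = F x.toNat := by
          rw [ha1, hb1, F_pos x.toNat (by omega)]
          congr 2
          · rw [h2]; omega
          · rw [h3]; omega
        refine ⟨hval, ?_⟩
        intro y w hy
        rw [PySem.Dict.get?_insert] at hy
        by_cases hyx : y = x
        · rw [if_pos hyx] at hy
          refine ⟨hyx ▸ hx, ?_⟩
          cases hy; rw [hyx, hval]
        · rw [if_neg hyx] at hy
          exact hb2 y w hy

lemma solve_alt_eq_F (n : Int) (hn : 0 ≤ n) : solve_alt n = F n.toNat := by
  have h := fMemo_correct (n.toNat + 1) n PySem.Dict.empty hn (by omega)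
    (by intro x v hx; simp [PySem.Dict.get?_empty] at hx)
  exact h.1

-- ---------- A side ----------
def Closed (d : PySem.Dict Int Int) (p : Int) : Prop :=
  (0 < PySem.Int.floordiv p 2 → d.contains (PySem.Int.floordiv p 2) = true) ∧
  (0 < PySem.Int.floordiv p 3 → d.contains (PySem.Int.floordiv p 3) = true)

def BFSInv (n : Int) (d : PySem.Dict Int Int) (queue : List Int) : Prop :=
  d.keys.Nodup ∧
  d.contains n = true ∧
  (∀ p ∈ queue, d.contains p = true) ∧
  (∀ p, d.contains p = true → 0 ≤ p ∧ p ≤ n) ∧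
  (∀ p, d.contains p = true → p ∉ queue → Closed d p)

lemma size_le (n : Int) (hn : 0 ≤ n) (d : PySem.Dict Int Int)
    (hnd : d.keys.Nodup) (hb : ∀ p, d.contains p = true → 0 ≤ p ∧ p ≤ n) :
    d.size ≤ n.toNat + 1 := by
  have hlen : d.keys.length = d.size := by
    simp [PySem.Dict.keys, PySem.Dict.size]
  have hsub : d.keys ⊆ PySem.List.pyRange 0 (n + 1) 1 := by
    intro k hk
    have hc : d.contains k = true := (PySem.Dict.contains_iff_mem_keys d k).mpr hk
    have := hb k hc
    exact PySem.List.mem_pyRange_one.mpr (by omega)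
  have := (List.subperm_of_subset hnd hsub).length_le
  rw [PySem.List.length_pyRange_one] at this
  omega

-- one child step of the BFS loop: the guarded insert of q (resp. r) and its append
lemma child_step (n c : Int) (d : PySem.Dict Int Int) (qu : List Int)
    (hnd : d.keys.Nodup) (hcn : d.contains n = true)
    (hqk : ∀ x ∈ qu, d.contains x = true)
    (hb : ∀ x, d.contains x = true → 0 ≤ x ∧ x ≤ n)
    (hcb : 0 ≤ c ∧ c ≤ n) :
    ∀ (d' : PySem.Dict Int Int) (qu' : List Int),
    d' = (if 0 < c ∧ d.contains c = false then d.insert c 0 else d) →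
    qu' = (if 0 < c ∧ d.contains c = false then qu ++ [c] else qu) →
    d'.keys.Nodup ∧ d'.contains n = true ∧
    (∀ x ∈ qu', d'.contains x = true) ∧
    (∀ x, d'.contains x = true → 0 ≤ x ∧ x ≤ n) ∧
    (∀ x, d.contains x = true → d'.contains x = true) ∧
    (∀ x, d'.contains x = true → d.contains x = true ∨ x ∈ qu') ∧
    (0 < c → d'.contains c = true) ∧
    (∀ x ∈ qu, x ∈ qu') ∧
    (d'.size + qu.length = d.size + qu'.length) ∧
    d.size ≤ d'.size := by
  intro d' qu' hd' hqu'
  by_cases hP : 0 < c ∧ d.contains c = false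
  · rw [if_pos hP] at hd'; rw [if_pos hP] at hqu'
    subst hd'; subst hqu'
    refine ⟨PySem.Dict.nodup_keys_insert d c 0 hnd, ?_, ?_, ?_, ?_, ?_, ?_, ?_, ?_, ?_⟩
    · rw [PySem.Dict.contains_insert]; simp [hcn]
    · intro x hx
      rcases List.mem_append.mp hx with h | h
      · rw [PySem.Dict.contains_insert]; simp [hqk x h]
      · rw [List.mem_singleton.mp h]; exact PySem.Dict.contains_insert_self d c 0
    · intro x hx
      rw [PySem.Dict.contains_insert] at hx
      rcases Bool.or_eq_true_iff.mp hx with h | h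
      · rw [beq_iff_eq.mp h]; omega
      · exact hb x h
    · intro x hx; rw [PySem.Dict.contains_insert]; simp [hx]
    · intro x hx
      rw [PySem.Dict.contains_insert] at hx
      rcases Bool.or_eq_true_iff.mp hx with h | h
      · right; rw [beq_iff_eq.mp h]; exact List.mem_append_right _ (List.mem_singleton.mpr rfl)
      · exact Or.inl h
    · intro _; exact PySem.Dict.contains_insert_self d c 0
    · intro x hx; exact List.mem_append_left _ hx
    · rw [PySem.Dict.size_insert, if_neg (by simp [hP.2])]
      simp; omega
    · rw [PySem.Dict.size_insert, if_neg (by simp [hP.2])]; omega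
  · rw [if_neg hP] at hd'; rw [if_neg hP] at hqu'
    subst hd'; subst hqu'
    refine ⟨hnd, hcn, hqk, hb, fun x hx => hx, fun x hx => Or.inl hx, ?_, fun x hx => hx,
      rfl, le_refl _⟩
    intro hc
    rcases not_and_or.mp hP with h | h
    · omega
    · exact Bool.not_eq_false _ ▸ (Bool.of_not_eq_false h)

lemma bfs_correct (n : Int) (hn : 0 ≤ n) :
    ∀ (fuel : Nat) (d : PySem.Dict Int Int) (queue : List Int),
    BFSInv n d queue → queue.length + 2 * ((n.toNat + 1) - d.size) ≤ fuel →
    BFSInv n (solveBFS fuel d queue) [] := by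
  intro fuel
  induction fuel with
  | zero =>
    intro d queue hInv hfuel
    have hq : queue = [] := List.eq_nil_of_length_eq_zero (by omega)
    subst hq
    simpa [solveBFS] using hInv
  | succ f ih =>
    intro d queue hInv hfuel
    obtain ⟨hnd, hcn, hqk, hb, hcl⟩ := hInv
    cases queue with
    | nil =>
      simp only [solveBFS, List.getLast?_nil]
      exact ⟨hnd, hcn, hqk, hb, hcl⟩
    | cons a t =>
      have hne : a :: t ≠ [] := List.cons_ne_nil a t
      have hgl : (a :: t).getLast? = some ((a :: t).getLast hne) := List.getLast?_eq_some_getLast hne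
      simp only [solveBFS, hgl]
      set p := (a :: t).getLast hne with hpdef
      set rest := (a :: t).dropLast with hrestdef
      have hsplit : rest ++ [p] = a :: t := List.dropLast_append_getLast hne
      have hpmem : p ∈ a :: t := by
        rw [← hsplit]; exact List.mem_append_right _ (List.mem_singleton.mpr rfl)
      have hpc : d.contains p = true := hqk p hpmem
      have hpb : 0 ≤ p ∧ p ≤ n := hb p hpc
      have hrestlen : rest.length + 1 = (a :: t).length := by
        rw [← hsplit]; simp
      have hrsub : ∀ x ∈ rest, x ∈ a :: t := by
        intro x hx; rw [← hsplit]; exact List.mem_append_left _ hx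
      set q := PySem.Int.floordiv p 2 with hqdef
      set r := PySem.Int.floordiv p 3 with hrdef
      have hqb : 0 ≤ q ∧ q ≤ n := by
        rw [hqdef, PySem.Int.floordiv_eq_ediv_of_pos (by norm_num : (0:Int) < 2)]; omega
      have hrb : 0 ≤ r ∧ r ≤ n := by
        rw [hrdef, PySem.Int.floordiv_eq_ediv_of_pos (by norm_num : (0:Int) < 3)]; omega
      set dq := if 0 < q ∧ d.contains q = false then d.insert q 0 else d with hdq
      set quq := if 0 < q ∧ d.contains q = false then rest ++ [q] else rest with hquq
      obtain ⟨hnd1, hcn1, hqk1, hb1, hmono1, hfrom1, hself1, hqmem1, hsz1, hszle1⟩ :=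
        child_step n q d rest hnd hcn (fun x hx => hqk x (hrsub x hx)) hb hqb dq quq hdq hquq
      set dr := if 0 < r ∧ dq.contains r = false then dq.insert r 0 else dq with hdr
      set qur := if 0 < r ∧ dq.contains r = false then quq ++ [r] else quq with hqur
      obtain ⟨hnd2, hcn2, hqk2, hb2, hmono2, hfrom2, hself2, hqmem2, hsz2, hszle2⟩ :=
        child_step n r dq quq hnd1 hcn1 hqk1 hb1 hrb dr qur hdr hqur
      have hInv' : BFSInv n dr qur := by
        refine ⟨hnd2, hcn2, hqk2, hb2, ?_⟩
        intro x hx hxq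
        rcases hfrom2 x hx with hxq' | hxq'
        swap
        · exact absurd hxq' hxq
        rcases hfrom1 x hxq' with hxd | hxm
        swap
        · exact absurd (hqmem2 x hxm) hxq
        by_cases hxp : x = p
        · subst hxp
          constructor
          · intro h; exact hmono2 _ (hself1 h)
          · intro h; exact hself2 h
        · have hxrest : x ∉ rest := by
            intro hxr; exact hxq (hqmem2 x (hqmem1 x hxr))
          have hxqueue : x ∉ a :: t := by
            rw [← hsplit]
            intro hmem
            rcases List.mem_append.mp hmem with h | h
            · exact hxrest h
            · exact hxp (List.mem_singleton.mp h)
          obtain ⟨hc2, hc3⟩ := hcl x hxd hxqueue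
          exact ⟨fun h => hmono2 _ (hmono1 _ (hc2 h)), fun h => hmono2 _ (hmono1 _ (hc3 h))⟩
      have hszN : dr.size ≤ n.toNat + 1 := size_le n hn dr hnd2 hb2
      refine ih dr qur hInv' ?_
      have hql : (a :: t).length = rest.length + 1 := hrestlen.symm
      omega

-- the generalized fill loop invariant
lemma fill_go (d2 : PySem.Dict Int Int)
    (hb : ∀ p, d2.contains p = true → 0 ≤ p)
    (h0 : d2.get? 0 = some 1)
    (hcl : ∀ p, d2.contains p = true → 1 ≤ p →
      d2.contains (PySem.Int.floordiv p 2) = true ∧ d2.contains (PySem.Int.floordiv p 3) = true) :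
    ∀ (l : List Int) (d' : PySem.Dict Int Int),
    l.Pairwise (· < ·) →
    (∀ x ∈ l, d2.contains x = true) →
    (∀ x, d2.contains x = true → x ∈ l ∨ d'.get? x = some (F x.toNat)) →
    (∀ x ∈ l, d'.get? x = d2.get? x) →
    ∀ x, d2.contains x = true → (solveFill l d').get? x = some (F x.toNat) := by
  intro l
  induction l with
  | nil =>
    intro d' _ _ hdone _ x hx
    rcases hdone x hx with h | h
    · exact absurd h (List.not_mem_nil)
    · exact h
  | cons p t ih =>
    intro d' hpair hmem hdone huntouched x hx
    have hpt : ∀ y ∈ t, p < y := by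
      intro y hy; exact (List.pairwise_cons.mp hpair).1 y hy
    have hpairt : t.Pairwise (· < ·) := (List.pairwise_cons.mp hpair).2
    have hpk : d2.contains p = true := hmem p (List.mem_cons_self)
    have hp0 : 0 ≤ p := hb p hpk
    by_cases hpz : p = 0
    · -- continue-branch
      have hstep : solveFill (p :: t) d' = solveFill t d' := by
        simp [solveFill, hpz]
      rw [hstep]
      refine ih d' hpairt (fun y hy => hmem y (List.mem_cons_of_mem _ hy)) ?_
        (fun y hy => huntouched y (List.mem_cons_of_mem _ hy)) x hx
      intro y hy
      rcases hdone y hy with h | h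
      · rcases List.mem_cons.mp h with h' | h'
        · right
          have hu := huntouched p (List.mem_cons_self)
          rw [hpz] at hu
          rw [h', hpz, hu, h0, Int.toNat_zero, F]
        · exact Or.inl h'
      · exact Or.inr h
    · -- update-branch
      have hp1 : 1 ≤ p := by omega
      have h2 : PySem.Int.floordiv p 2 = p / 2 := PySem.Int.floordiv_eq_ediv_of_pos (by norm_num)
      have h3 : PySem.Int.floordiv p 3 = p / 3 := PySem.Int.floordiv_eq_ediv_of_pos (by norm_num)
      obtain ⟨hq, hr⟩ := hcl p hpk hp1
      have hqlt : PySem.Int.floordiv p 2 < p := by rw [h2]; omega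
      have hrlt : PySem.Int.floordiv p 3 < p := by rw [h3]; omega
      have hnotin : ∀ c : Int, c < p → c ∉ p :: t := by
        intro c hc hcmem
        rcases List.mem_cons.mp hcmem with h' | h'
        · omega
        · have := hpt c h'; omega
      have hqdone : d'.get? (PySem.Int.floordiv p 2) = some (F (PySem.Int.floordiv p 2).toNat) := by
        rcases hdone _ hq with h | h
        · exact absurd h (hnotin _ hqlt)
        · exact h
      have hrdone : d'.get? (PySem.Int.floordiv p 3) = some (F (PySem.Int.floordiv p 3).toNat) := by
        rcases hdone _ hr with h | h
        · exact absurd h (hnotin _ hrlt)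
        · exact h
      have hval : d'.getD (PySem.Int.floordiv p 2) 0 + d'.getD (PySem.Int.floordiv p 3) 0
          = F p.toNat := by
        rw [PySem.Dict.getD_eq_get?_getD, PySem.Dict.getD_eq_get?_getD, hqdone, hrdone]
        rw [F_pos p.toNat (by omega)]
        show F (PySem.Int.floordiv p 2).toNat + F (PySem.Int.floordiv p 3).toNat = _
        congr 2
        · rw [h2]; omega
        · rw [h3]; omega
      have hstep : solveFill (p :: t) d' = solveFill t
          (d'.insert p (d'.getD (PySem.Int.floordiv p 2) 0 + d'.getD (PySem.Int.floordiv p 3) 0)) := by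
        simp only [solveFill, List.foldl_cons, if_neg hpz]
      rw [hstep, hval]
      refine ih (d'.insert p (F p.toNat)) hpairt (fun y hy => hmem y (List.mem_cons_of_mem _ hy)) ?_ ?_ x hx
      · intro y hy
        by_cases hyp : y = p
        · right
          rw [hyp, PySem.Dict.get?_insert_self]
        · rcases hdone y hy with h | h
          · rcases List.mem_cons.mp h with h' | h'
            · exact absurd h' hyp
            · exact Or.inl h'
          · right
            rw [PySem.Dict.get?_insert_of_ne _ _ hyp]
            exact h
      · intro y hy
        have hyp : y ≠ p := by have := hpt y hy; omega
        rw [PySem.Dict.get?_insert_of_ne _ _ hyp]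
        exact huntouched y (List.mem_cons_of_mem _ hy)

lemma fill_correct (n : Int) (_hn : 0 ≤ n) (d2 : PySem.Dict Int Int)
    (hnd : d2.keys.Nodup)
    (h0 : d2.get? 0 = some 1)
    (hb : ∀ p, d2.contains p = true → 0 ≤ p ∧ p ≤ n)
    (hcl : ∀ p, d2.contains p = true → 1 ≤ p →
      d2.contains (PySem.Int.floordiv p 2) = true ∧ d2.contains (PySem.Int.floordiv p 3) = true) :
    ∀ x, d2.contains x = true →
      (solveFill (PySem.List.sorted d2.keys (fun x => x) false) d2).get? x = some (F x.toNat) := by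
  intro x hx
  have hperm : (PySem.List.sorted d2.keys (fun x => x) false).Perm d2.keys :=
    PySem.List.sorted_perm _ _ _
  have hsn : (PySem.List.sorted d2.keys (fun x => x) false).Nodup := hperm.nodup_iff.mpr hnd
  have hle : (PySem.List.sorted d2.keys (fun x => x) false).Pairwise (fun a b => a ≤ b) :=
    PySem.List.sorted_pairwise d2.keys (fun x => x)
  have hlt : (PySem.List.sorted d2.keys (fun x => x) false).Pairwise (· < ·) :=
    (hle.and hsn).imp (fun h => lt_of_le_of_ne h.1 h.2)
  refine fill_go d2 (fun p hp => (hb p hp).1) h0 hcl _ d2 hlt ?_ ?_ (fun y _ => rfl) x hx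
  · intro y hy
    exact (PySem.Dict.contains_iff_mem_keys d2 y).mpr
      ((PySem.List.mem_sorted _ _ _ y).mp hy)
  · intro y hy
    exact Or.inl ((PySem.List.mem_sorted _ _ _ y).mpr
      ((PySem.Dict.contains_iff_mem_keys d2 y).mp hy))

lemma solve_eq_F (n : Int) (hn : 0 ≤ n) : solve n = F n.toNat := by
  have hc0 : ((PySem.Dict.empty : PySem.Dict Int Int).insert n 0).contains n = true :=
    PySem.Dict.contains_insert_self _ n 0
  have hkey0 : ∀ p, ((PySem.Dict.empty : PySem.Dict Int Int).insert n 0).contains p = true →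
      p = n := by
    intro p hp
    rw [PySem.Dict.contains_insert] at hp
    rcases Bool.or_eq_true_iff.mp hp with h | h
    · exact beq_iff_eq.mp h
    · rw [PySem.Dict.contains_empty] at h; exact absurd h (by simp)
  have hInv0 : BFSInv n ((PySem.Dict.empty : PySem.Dict Int Int).insert n 0) [n] := by
    refine ⟨PySem.Dict.nodup_keys_insert _ n 0 PySem.Dict.nodup_keys_empty, hc0, ?_, ?_, ?_⟩
    · intro p hp; rw [List.mem_singleton.mp hp]; exact hc0
    · intro p hp; rw [hkey0 p hp]; omega
    · intro p hp hpq
      exact absurd (by rw [hkey0 p hp]; exact List.mem_singleton.mpr rfl) hpq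
  have hsz0 : ((PySem.Dict.empty : PySem.Dict Int Int).insert n 0).size = 1 := by
    rw [PySem.Dict.size_insert, if_neg (by simp [PySem.Dict.contains_empty]),
      PySem.Dict.size_empty]
  set d1 := solveBFS (2 * n.toNat + 3) ((PySem.Dict.empty : PySem.Dict Int Int).insert n 0) [n]
    with hd1
  obtain ⟨hnd1, hcn1, _, hb1, hcl1⟩ :=
    bfs_correct n hn (2 * n.toNat + 3) _ [n] hInv0 (by rw [hsz0]; simp; omega)
  set d2 := d1.insert 0 1 with hd2
  have hmono : ∀ x, d1.contains x = true → d2.contains x = true := by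
    intro x hx; rw [hd2, PySem.Dict.contains_insert]; simp [hx]
  have hnd2 : d2.keys.Nodup := PySem.Dict.nodup_keys_insert d1 0 1 hnd1
  have h02 : d2.get? 0 = some 1 := PySem.Dict.get?_insert_self d1 0 1
  have hb2 : ∀ p, d2.contains p = true → 0 ≤ p ∧ p ≤ n := by
    intro p hp
    rw [hd2, PySem.Dict.contains_insert] at hp
    rcases Bool.or_eq_true_iff.mp hp with h | h
    · rw [beq_iff_eq.mp h]; omega
    · exact hb1 p h
  have hcl2 : ∀ p, d2.contains p = true → 1 ≤ p →
      d2.contains (PySem.Int.floordiv p 2) = true ∧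
      d2.contains (PySem.Int.floordiv p 3) = true := by
    intro p hp hp1
    have hpd1 : d1.contains p = true := by
      rw [hd2, PySem.Dict.contains_insert] at hp
      rcases Bool.or_eq_true_iff.mp hp with h | h
      · have := beq_iff_eq.mp h; omega
      · exact h
    obtain ⟨hc2, hc3⟩ := hcl1 p hpd1 (List.not_mem_nil)
    have hpb := hb1 p hpd1
    constructor
    · by_cases h : 0 < PySem.Int.floordiv p 2
      · exact hmono _ (hc2 h)
      · have : PySem.Int.floordiv p 2 = 0 := by
          rw [PySem.Int.floordiv_eq_ediv_of_pos (by norm_num : (0:Int) < 2)] at h ⊢; omega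
        rw [this, hd2]; exact PySem.Dict.contains_insert_self d1 0 1
    · by_cases h : 0 < PySem.Int.floordiv p 3
      · exact hmono _ (hc3 h)
      · have : PySem.Int.floordiv p 3 = 0 := by
          rw [PySem.Int.floordiv_eq_ediv_of_pos (by norm_num : (0:Int) < 3)] at h ⊢; omega
        rw [this, hd2]; exact PySem.Dict.contains_insert_self d1 0 1
  have hget := fill_correct n hn d2 hnd2 h02 hb2 hcl2 n (hmono n hcn1)
  show (solveFill (PySem.List.sorted d2.keys (fun x => x) false) d2).getD n 0 = F n.toNat
  rw [PySem.Dict.getD_eq_get?_getD, hget]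
  rfl

-- ===== VERDICT (by name: the statement is the Claim_ definition above) =====
theorem solve_spec : Claim_equal_solve := by
  intro n _ hpre
  unfold Spec_solve
  rw [solve_eq_F n hpre, solve_alt_eq_F n hpre]
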